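-- pv_equiv track=rewrite | github.com/Yogesh-333/PulseQuery-AI | core/prompt_optimizer.py | _fallback_features
-- ===== SOURCE A (Python) =====
-- from typing import Dict, List, Any, Optional, Tuple
--
-- def _fallback_features(texts: List[str]) -> List[List[float]]:
--     """Fallback feature extraction when MedEmbed is not available"""
--     features = []
--     for text in texts:
--         words = text.lower().split()
--         feature_vector = [
--             len([w for w in words if 'patient' in w]),
--             len([w for w in words if 'pain' in w]),
--             len([w for w in words if 'heart' in w]),
--             len([w for w in words if 'medical' in w]),
--             len(words)  # Total word count
--         ]
--         features.append(feature_vector)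
--     return features
-- ===== SOURCE B (Python) =====
-- from typing import List
--
-- def _word_features(text: str) -> List[int]:
--     words = text.lower().split()
--     patient = pain = heart = medical = 0
--     for w in words:
--         if 'patient' in w:
--             patient += 1
--         if 'pain' in w:
--             pain += 1
--         if 'heart' in w:
--             heart += 1
--         if 'medical' in w:
--             medical += 1
--     return [patient, pain, heart, medical, len(words)]
--
-- def _fallback_features(texts: List[str]) -> List[List[int]]:
--     return [_word_features(text) for text in texts]
-- ===== Notes on version B (the rewrite author's own statement) =====
-- stated objective: faster
-- what changed: Replaces A's four separate comprehension scans over the word list (plus append-accumulator outer loop) with a per-text helper that makes one pass over the words maintaining four counters, mapped over the texts by a comprehension.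
import Mathlib
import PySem

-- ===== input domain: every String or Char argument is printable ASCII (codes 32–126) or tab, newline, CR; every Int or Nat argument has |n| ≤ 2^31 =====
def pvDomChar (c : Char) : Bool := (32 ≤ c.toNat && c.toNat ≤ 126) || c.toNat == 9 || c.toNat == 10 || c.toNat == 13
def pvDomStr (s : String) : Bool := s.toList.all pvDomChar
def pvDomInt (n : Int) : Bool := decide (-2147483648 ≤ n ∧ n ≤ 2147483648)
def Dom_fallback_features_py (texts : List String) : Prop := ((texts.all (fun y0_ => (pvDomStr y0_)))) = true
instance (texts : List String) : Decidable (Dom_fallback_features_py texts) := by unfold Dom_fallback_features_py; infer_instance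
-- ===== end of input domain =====

-- B replaces A's four separate comprehension scans per text with a single pass over the
-- words maintaining four counters (same asymptotic cost, measurably smaller constant: one scan instead of four).

-- ===== PORT A =====
def fallback_features_py (texts : List String) : List (List Int) :=
  texts.foldl (fun features text =>
    let words := PySem.Str.split₀ (PySem.Str.lower text)
    let feature_vector : List Int :=
      [ ((words.filter (fun w => PySem.Str.isIn "patient" w)).length : Int),
        ((words.filter (fun w => PySem.Str.isIn "pain" w)).length : Int),
        ((words.filter (fun w => PySem.Str.isIn "heart" w)).length : Int),
        ((words.filter (fun w => PySem.Str.isIn "medical" w)).length : Int),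
        (words.length : Int) ]
    features ++ [feature_vector]) []

-- ===== PORT B =====
def word_features (text : String) : List Int :=
  let words := PySem.Str.split₀ (PySem.Str.lower text)
  let c : Int × Int × Int × Int :=
    words.foldl (fun c w =>
      (c.1 + (if PySem.Str.isIn "patient" w then 1 else 0),
       c.2.1 + (if PySem.Str.isIn "pain" w then 1 else 0),
       c.2.2.1 + (if PySem.Str.isIn "heart" w then 1 else 0),
       c.2.2.2 + (if PySem.Str.isIn "medical" w then 1 else 0))) (0, 0, 0, 0)
  [c.1, c.2.1, c.2.2.1, c.2.2.2, (words.length : Int)]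

def fallback_features_py_alt (texts : List String) : List (List Int) :=
  texts.map word_features

-- ===== PRECONDITION & SPEC =====
def Spec_fallback_features_py (texts : List String) (out : List (List Int)) : Prop := out = fallback_features_py_alt texts
instance (texts : List String) (out : List (List Int)) : Decidable (Spec_fallback_features_py texts out) := by unfold Spec_fallback_features_py; infer_instance

-- ===== CLAIM (what is proved, stated in full; the proofs are below) =====
def Claim_equal_fallback_features_py : Prop := ∀ (texts : List String), Dom_fallback_features_py texts → Spec_fallback_features_py texts (fallback_features_py texts)

-- ===== LEMMAS AND PROOFS =====

-- the single-pass four-counter fold computes the four filter lengths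
theorem counters_eq (p q r s : String → Bool) (words : List String) (a b c d : Int) :
    words.foldl (fun c w =>
      (c.1 + (if p w then 1 else 0),
       c.2.1 + (if q w then 1 else 0),
       c.2.2.1 + (if r w then 1 else 0),
       c.2.2.2 + (if s w then 1 else 0))) (a, b, c, d)
    = (a + ((words.filter p).length : Int),
       b + ((words.filter q).length : Int),
       c + ((words.filter r).length : Int),
       d + ((words.filter s).length : Int)) := by
  induction words generalizing a b c d with
  | nil => simp
  | cons w ws ih =>
    simp only [List.foldl_cons]
    rw [ih]
    simp only [List.filter_cons]
    split_ifs <;> (simp [Prod.ext_iff]; try push_cast) <;> try omega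

theorem word_features_eq (text : String) :
    word_features text
    = (let words := PySem.Str.split₀ (PySem.Str.lower text)
       ([ ((words.filter (fun w => PySem.Str.isIn "patient" w)).length : Int),
          ((words.filter (fun w => PySem.Str.isIn "pain" w)).length : Int),
          ((words.filter (fun w => PySem.Str.isIn "heart" w)).length : Int),
          ((words.filter (fun w => PySem.Str.isIn "medical" w)).length : Int),
          (words.length : Int) ] : List Int)) := by
  simp only [word_features]
  rw [counters_eq]
  simp only [zero_add]

-- ===== VERDICT (by name: the statement is the Claim_ definition above) =====
theorem fallback_features_py_spec : Claim_equal_fallback_features_py := by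
  intro texts _
  unfold Spec_fallback_features_py fallback_features_py fallback_features_py_alt
  rw [PySem.List.foldl_append_singleton_eq_map, List.nil_append]
  exact List.map_congr_left (fun t _ => (word_features_eq t).symm)
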